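-- pv_equiv track=rewrite | github.com/MengxiQ/CMS | CMS/apps/tools/vlansTools.py | List2Vlans
-- ===== SOURCE A (Python) =====
-- def List2Vlans(vlans_list, digits=1024):
--     """传入vlans清单列表，返回vlan表达串"""
--     # 生成1024*4位二进制0字符串，转化成列表
--     bin2_list = list(format(0, '0' + str(digits * 4) + 'b'))
--     # 设置vlan号的位，置'1'
--     for vlan in vlans_list:
--         if isinstance(vlan, int):
--             bin2_list[vlan] = '1'
--         else:
--             bin2_list[int(vlan)] = '1'
--     # 再转化成字符串
--     bin2_str = ''.join(bin2_list)
--     # 将2进制字符串转化成十进制数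
--     int10 = int(bin2_str, 2)
--     # 将十进制数转化成1204位16进制字符串表达式
--     str16 = format(int10, '0' + str(digits) + 'X')
--     return str16
-- ===== SOURCE B (Python) =====
-- def List2Vlans(vlans_list, digits=1024):
--     """Keep one 0..15 nibble per output hex digit and set the vlan's bit in
--     its nibble, then emit the hex characters directly (no binary string,
--     no int(...,2) reparse, no big-integer formatting)."""
--     nibbles = [0] * digits
--     for vlan in vlans_list:
--         v = int(vlan)
--         nibbles[v // 4] |= 8 >> (v % 4)
--     return ''.join('0123456789ABCDEF'[x] for x in nibbles)
-- ===== Notes on version B (the rewrite author's own statement) =====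
-- stated objective: alternative
-- what changed: B keeps one 0..15 nibble per output hex digit and sets the vlan's bit inside its nibble with nibbles[v//4] |= 8 >> (v%4), then emits the hex characters directly, instead of A's building a 4*digits-char binary string, reparsing it with int(s,2) into a big integer and formatting that with format(n,'0<digits>X').
-- outside the precondition, e.g. on List2Vlans([0], 0): A returns '1', B raises IndexError; on List2Vlans([], 0): A returns '0', B returns ''
import Mathlib
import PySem

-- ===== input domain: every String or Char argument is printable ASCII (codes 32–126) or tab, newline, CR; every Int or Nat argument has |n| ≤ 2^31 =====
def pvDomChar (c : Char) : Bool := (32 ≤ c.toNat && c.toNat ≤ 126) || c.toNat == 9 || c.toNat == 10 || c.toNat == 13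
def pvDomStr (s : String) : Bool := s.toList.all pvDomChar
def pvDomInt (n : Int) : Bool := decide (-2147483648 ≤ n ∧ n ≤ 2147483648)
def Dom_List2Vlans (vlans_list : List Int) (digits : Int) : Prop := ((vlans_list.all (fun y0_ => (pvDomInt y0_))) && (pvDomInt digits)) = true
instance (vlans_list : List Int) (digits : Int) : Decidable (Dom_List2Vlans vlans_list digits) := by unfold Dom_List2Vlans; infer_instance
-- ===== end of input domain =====

-- B replaces A's binary-string build / int(s,2) reparse / big-int hex format by a per-hex-digit
-- nibble array whose characters are emitted directly (objective: alternative, same asymptotic cost).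

-- '0123456789ABCDEF' (the hex digit table, used by B; A's format(...,'X') port uses it per digit)
def pvHexTable : List Char :=
  ['0','1','2','3','4','5','6','7','8','9','A','B','C','D','E','F']

def pvHexDigit (n : Nat) : Char := pvHexTable.getD n '0'

-- ===== PORT A =====
-- hex digits of n (no sign, uppercase): the digit string format(n, 'X') produces for n ≥ 0
def pvHexChars (n : Nat) : List Char :=
  if _h : n < 16 then [pvHexDigit n]
  else pvHexChars (n / 16) ++ [pvHexDigit (n % 16)]
  decreasing_by exact Nat.div_lt_self (by omega) (by norm_num)

-- format(n, '0' + str(w) + 'X') for n ≥ 0, w ≥ 1: zero-pad the hex digits to width w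
def pvFormatHexUpper (n w : Nat) : String :=
  String.mk (List.replicate (w - (pvHexChars n).length) '0' ++ pvHexChars n)

def List2Vlans (vlans_list : List Int) (digits : Int) : String :=
  -- format(0, '0'+str(digits*4)+'b') = digits*4 zeros (exact for digits ≥ 1, cf. Pre_)
  let bin2_list : List Char := List.replicate (digits * 4).toNat '0'
  -- bin2_list[vlan] = '1'  (pySetD is exact — incl. negative-index wraparound — under Pre_'s range bound;
  -- isinstance(vlan,int) is always true under the list[int] type convention, int(vlan) = vlan)
  let bin2_list := vlans_list.foldl (fun L vlan => PySem.List.pySetD L vlan '1') bin2_list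
  -- int(''.join(bin2_list), 2): exact, the list holds only '0'/'1' characters
  let int10 : Nat := bin2_list.foldl (fun a c => 2 * a + (if c = '1' then 1 else 0)) 0
  -- format(int10, '0'+str(digits)+'X')
  pvFormatHexUpper int10 digits.toNat

-- ===== PORT B =====
-- one loop step of Source B: nibbles[v // 4] |= 8 >> (v % 4)
def pvStepB (N : List Int) (vlan : Int) : List Int :=
  PySem.List.pySetD N (PySem.Int.floordiv vlan 4)
    (PySem.Int.bor (PySem.List.pyGetD N (PySem.Int.floordiv vlan 4) 0)
      ((8 : Int) >>> (PySem.Int.mod vlan 4).toNat))   -- shift amount v % 4 ∈ [0,3]: toNat exact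

def List2Vlans_alt (vlans_list : List Int) (digits : Int) : String :=
  let nibbles : List Int := List.replicate digits.toNat 0   -- [0] * digits
  let nibbles := vlans_list.foldl pvStepB nibbles
  -- ''.join('0123456789ABCDEF'[x] for x in nibbles); each x is in [0,15] so pyGetD's default is never used
  String.mk (nibbles.map (fun x => PySem.List.pyGetD pvHexTable x ' '))

-- ===== PRECONDITION & SPEC =====
-- Pre_ excludes digits < 1 (for digits < 0 A raises ValueError on the format specifier; for digits = 0 A's
-- '0'-width format still yields a 1-bit buffer and A returns an accidental unpadded value, where B raises
-- IndexError or returns the natural empty string) and vlans outside [-digits*4, digits*4), where A raises IndexError.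
def Pre_List2Vlans (vlans_list : List Int) (digits : Int) : Prop :=
  1 ≤ digits ∧ ∀ v ∈ vlans_list, -(digits * 4) ≤ v ∧ v < digits * 4

instance (vlans_list : List Int) (digits : Int) : Decidable (Pre_List2Vlans vlans_list digits) := by
  unfold Pre_List2Vlans; infer_instance

def pvWitness_List2Vlans : List Int × Int := ([1, -1, 3], 2)

def Spec_List2Vlans (vlans_list : List Int) (digits : Int) (out : String) : Prop := out = List2Vlans_alt vlans_list digits
instance (vlans_list : List Int) (digits : Int) (out : String) : Decidable (Spec_List2Vlans vlans_list digits out) := by unfold Spec_List2Vlans; infer_instance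

-- ===== CLAIM (what is proved, stated in full; the proofs are below) =====
def Claim_equal_List2Vlans : Prop := ∀ (vlans_list : List Int) (digits : Int), Dom_List2Vlans vlans_list digits → Pre_List2Vlans vlans_list digits → Spec_List2Vlans vlans_list digits (List2Vlans vlans_list digits)

-- ===== LEMMAS AND PROOFS =====

-- the bit recorded at position m of A's char buffer (0 outside the buffer)
def pvBit (L : List Char) (m : Nat) : Nat := if L.getD m '0' = '1' then 1 else 0

-- the value of the i-th nibble (hex digit) encoded in A's char buffer
def pvNib (L : List Char) (i : Nat) : Nat :=
  8 * pvBit L (4 * i) + 4 * pvBit L (4 * i + 1) + 2 * pvBit L (4 * i + 2) + pvBit L (4 * i + 3)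

-- value of a bit string (the recursion A's int(s,2) fold computes)
def pvParse : List Char → Nat
  | [] => 0
  | c :: cs => (if c = '1' then 1 else 0) * 2 ^ cs.length + pvParse cs

-- value of a nibble list in base 16
def pvVal16 : List Int → Nat
  | [] => 0
  | x :: xs => x.toNat * 16 ^ xs.length + pvVal16 xs

lemma pvFoldlParse (L : List Char) (a : Nat) :
    L.foldl (fun a c => 2 * a + (if c = '1' then 1 else 0)) a = a * 2 ^ L.length + pvParse L := by
  induction L generalizing a with
  | nil => simp [pvParse]
  | cons c cs ih =>
      simp only [List.foldl_cons, ih, pvParse, List.length_cons]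
      ring

lemma pvBit_le_one (L : List Char) (m : Nat) : pvBit L m ≤ 1 := by
  unfold pvBit; split <;> omega

lemma pvBit_set (L : List Char) (j m : Nat) (hj : j < L.length) :
    pvBit (L.set j '1') m = if m = j then 1 else pvBit L m := by
  rcases eq_or_ne m j with rfl | h
  · simp [pvBit, List.getD, hj]
  · simp [pvBit, List.getD, List.getElem?_set_ne (Ne.symm h), h]

lemma pvBit_replicate (k m : Nat) : pvBit (List.replicate k '0') m = 0 := by
  unfold pvBit
  rcases Nat.lt_or_ge m k with h | h
  · simp [List.getD, List.getElem?_replicate, if_pos h]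
  · have hnone : (List.replicate k '0')[m]? = none := by
      rw [List.getElem?_eq_none_iff]; simpa using h
    simp [List.getD, hnone]

-- setting bit j % 4 in a nibble, as Python's  x | (8 >> r)
lemma pvBor_nib (b0 b1 b2 b3 r : Nat) (h0 : b0 ≤ 1) (h1 : b1 ≤ 1) (h2 : b2 ≤ 1)
    (h3 : b3 ≤ 1) (hr : r < 4) :
    PySem.Int.bor ((8*b0+4*b1+2*b2+b3 : Nat) : Int) ((8:Int) >>> r)
      = ((8*(if r = 0 then 1 else b0) + 4*(if r = 1 then 1 else b1)
          + 2*(if r = 2 then 1 else b2) + (if r = 3 then 1 else b3) : Nat) : Int) := by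
  interval_cases b0 <;> interval_cases b1 <;> interval_cases b2 <;> interval_cases b3 <;>
    interval_cases r <;> decide

-- Python in-range indexing (possibly negative), normalised to a Nat position
lemma pvIdx_inrange (n : Nat) (i : Int) (h1 : -(n : Int) ≤ i) (h2 : i < (n : Int)) :
    PySem.List.pyIdx? n i = some (if 0 ≤ i then i.toNat else ((n : Int) + i).toNat) := by
  by_cases h : 0 ≤ i
  · rw [if_pos h]
    simp only [PySem.List.pyIdx?]
    split <;> rename_i hh
    all_goals first | (exfalso; omega) | (congr 1; omega) | rfl
  · rw [if_neg h]
    simp only [PySem.List.pyIdx?]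
    split <;> rename_i hh
    all_goals first | (exfalso; omega) | (congr 1; omega) | rfl

lemma pvSetD_inrange {α : Type} (xs : List α) (i : Int) (a : α)
    (h1 : -(xs.length : Int) ≤ i) (h2 : i < (xs.length : Int)) :
    PySem.List.pySetD xs i a
      = xs.set (if 0 ≤ i then i.toNat else ((xs.length : Int) + i).toNat) a := by
  simp only [PySem.List.pySetD, PySem.List.pySet?, pvIdx_inrange _ _ h1 h2]
  rfl

lemma pvGetD_inrange {α : Type} (xs : List α) (i : Int) (d : α)
    (h1 : -(xs.length : Int) ≤ i) (h2 : i < (xs.length : Int)) :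
    PySem.List.pyGetD xs i d
      = xs.getD (if 0 ≤ i then i.toNat else ((xs.length : Int) + i).toNat) d := by
  simp only [PySem.List.pyGetD, PySem.List.pyGet?, pvIdx_inrange _ _ h1 h2]
  split <;> simp_all [List.getD]

-- one loop step preserves the nibble relation (pure Nat bit-position form)
lemma pvStep_inv (L : List Char) (N : List Int) (j : Nat)
    (hL : L.length = 4 * N.length) (hj : j < 4 * N.length)
    (hinv : ∀ i, i < N.length → N.getD i 0 = (pvNib L i : Int)) :
    ∀ i, i < N.length →
      (N.set (j / 4) (PySem.Int.bor (N.getD (j / 4) 0) ((8 : Int) >>> (j % 4)))).getD i 0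
        = (pvNib (L.set j '1') i : Int) := by
  intro i hi
  have hjL : j < L.length := by omega
  by_cases hij : i = j / 4
  · subst hij
    have hset : (N.set (j / 4) (PySem.Int.bor (N.getD (j / 4) 0) ((8 : Int) >>> (j % 4)))).getD (j/4) 0
        = PySem.Int.bor (N.getD (j / 4) 0) ((8 : Int) >>> (j % 4)) := by
      simp [List.getD, hi]
    rw [hset, hinv _ hi]
    have hr : j % 4 < 4 := by omega
    have e0 : (4 * (j/4) = j) ↔ (j % 4 = 0) := by omega
    have e1 : (4 * (j/4) + 1 = j) ↔ (j % 4 = 1) := by omega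
    have e2 : (4 * (j/4) + 2 = j) ↔ (j % 4 = 2) := by omega
    have e3 : (4 * (j/4) + 3 = j) ↔ (j % 4 = 3) := by omega
    unfold pvNib
    rw [pvBor_nib _ _ _ _ _ (pvBit_le_one L _) (pvBit_le_one L _) (pvBit_le_one L _)
        (pvBit_le_one L _) hr]
    rw [pvBit_set L j _ hjL, pvBit_set L j _ hjL, pvBit_set L j _ hjL, pvBit_set L j _ hjL]
    simp only [e0, e1, e2, e3]
  · have hset : (N.set (j / 4) (PySem.Int.bor (N.getD (j / 4) 0) ((8 : Int) >>> (j % 4)))).getD i 0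
        = N.getD i 0 := by
      simp [List.getD, List.getElem?_set_ne (by omega : j/4 ≠ i)]
    rw [hset, hinv _ hi]
    unfold pvNib
    rw [pvBit_set L j _ hjL, pvBit_set L j _ hjL, pvBit_set L j _ hjL, pvBit_set L j _ hjL]
    have : ∀ t, t < 4 → ¬ (4 * i + t = j) := by omega
    simp only [if_neg (by omega : ¬ (4*i = j)), if_neg (this 1 (by omega)),
      if_neg (this 2 (by omega)), if_neg (this 3 (by omega))]

-- the two loops run in step: B's nibble list always encodes A's bit buffer
lemma pvLoop_inv (vs : List Int) : ∀ (L : List Char) (N : List Int),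
    L.length = 4 * N.length →
    (∀ v ∈ vs, -((N.length : Int) * 4) ≤ v ∧ v < (N.length : Int) * 4) →
    (∀ i, i < N.length → N.getD i 0 = (pvNib L i : Int)) →
    (vs.foldl (fun L vlan => PySem.List.pySetD L vlan '1') L).length = 4 * N.length ∧
    (vs.foldl pvStepB N).length = N.length ∧
    (∀ i, i < N.length →
      (vs.foldl pvStepB N).getD i 0
        = (pvNib (vs.foldl (fun L vlan => PySem.List.pySetD L vlan '1') L) i : Int)) := by
  induction vs with
  | nil => intro L N hL _ hinv; exact ⟨hL, rfl, hinv⟩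
  | cons v vs ih =>
    intro L N hL hb hinv
    obtain ⟨hv1, hv2⟩ := hb v (by simp)
    set j : Nat := if 0 ≤ v then v.toNat else (((4 * N.length : Nat) : Int) + v).toNat with hjdef
    have hj : j < 4 * N.length := by simp only [hjdef]; split <;> omega
    have fd : PySem.Int.floordiv v 4 = v / 4 := PySem.Int.floordiv_eq_ediv_of_pos (by norm_num)
    have md : PySem.Int.mod v 4 = v % 4 := PySem.Int.mod_eq_emod_of_pos (by norm_num)
    have hA : PySem.List.pySetD L v '1' = L.set j '1' := by
      rw [pvSetD_inrange L v '1' (by omega) (by omega)]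
      congr 1
      simp only [hjdef, hL]
    have hidx : (if 0 ≤ v / 4 then (v / 4).toNat else ((N.length : Int) + v / 4).toNat) = j / 4 := by
      simp only [hjdef]; split <;> split <;> omega
    have hmod : (PySem.Int.mod v 4).toNat = j % 4 := by
      rw [md]; simp only [hjdef]; split <;> omega
    have hB : pvStepB N v
        = N.set (j / 4) (PySem.Int.bor (N.getD (j / 4) 0) ((8 : Int) >>> (j % 4))) := by
      unfold pvStepB
      rw [fd, pvSetD_inrange N (v / 4) _ (by omega) (by omega),
        pvGetD_inrange N (v / 4) 0 (by omega) (by omega), hidx, hmod]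
    simp only [List.foldl_cons, hA, hB]
    obtain ⟨c1, c2, c3⟩ := ih (L.set j '1')
      (N.set (j / 4) (PySem.Int.bor (N.getD (j / 4) 0) ((8 : Int) >>> (j % 4))))
      (by simpa using hL)
      (fun w hw => by simpa using hb w (by simp [hw]))
      (fun i hi => pvStep_inv L N j hL hj hinv i (by simpa using hi))
    refine ⟨by simpa using c1, by simpa using c2, fun i hi => by simpa using c3 i (by simpa using hi)⟩

lemma pvParse_val (N : List Int) : ∀ (L : List Char),
    L.length = 4 * N.length →
    (∀ i, i < N.length → N.getD i 0 = (pvNib L i : Int)) →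
    pvParse L = pvVal16 N := by
  induction N with
  | nil =>
    intro L hL _
    have : L = [] := List.eq_nil_of_length_eq_zero (by simpa using hL)
    simp [this, pvParse, pvVal16]
  | cons x xs ih =>
    intro L hL hinv
    match L, hL with
    | a :: b :: c :: d :: L', hL =>
      have hL' : L'.length = 4 * xs.length := by
        simp only [List.length_cons, List.length_cons] at hL ⊢; omega
      have htail : ∀ i, i < xs.length → xs.getD i 0 = (pvNib L' i : Int) := by
        intro i hi
        have := hinv (i + 1) (by simp; omega)
        simpa [pvNib, pvBit, List.getD, show 4 * (i+1) = 4*i + 4 by ring,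
          List.getElem?_cons_succ] using this
      have hx : x.toNat = pvNib (a :: b :: c :: d :: L') 0 := by
        have := hinv 0 (by simp)
        simp only [List.getD, List.getElem?_cons_zero, Option.getD_some] at this
        omega
      have hnib0 : pvNib (a :: b :: c :: d :: L') 0
          = 8 * (if a = '1' then 1 else 0) + 4 * (if b = '1' then 1 else 0)
            + 2 * (if c = '1' then 1 else 0) + (if d = '1' then 1 else 0) := by
        simp [pvNib, pvBit, List.getD]
      simp only [pvParse, pvVal16, List.length_cons, hL', ih L' hL' htail, hx, hnib0]
      have h16 : (16 : Nat) ^ xs.length = 2 ^ (4 * xs.length) := by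
        rw [show (16:Nat) = 2^4 by norm_num, ← pow_mul]
      rw [h16]
      ring

lemma pvVal16_append_singleton (M : List Int) (x : Int) :
    pvVal16 (M ++ [x]) = 16 * pvVal16 M + x.toNat := by
  induction M with
  | nil => simp [pvVal16]
  | cons y ys ih =>
      simp only [List.cons_append, pvVal16, List.length_append, List.length_cons, ih,
        List.length_nil]
      ring

lemma pvVal16_pos (M : List Int) (hne : M ≠ []) (hhd : M.getD 0 0 ≠ 0)
    (hb : ∀ x ∈ M, 0 ≤ x ∧ x < 16) : 1 ≤ pvVal16 M := by
  match M, hne with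
  | y :: ys, _ =>
    have h := hb y (by simp)
    have h1 : 1 ≤ y.toNat := by
      simp only [List.getD, List.getElem?_cons_zero, Option.getD_some] at hhd
      omega
    have hp : 0 < (16:Nat) ^ ys.length := pow_pos (by norm_num) _
    have : 1 ≤ y.toNat * 16 ^ ys.length := Nat.one_le_iff_ne_zero.mpr (by positivity)
    simp only [pvVal16]; omega

-- format(n,'X') of the value of a nibble list with a non-zero leading nibble is exactly its digits
lemma pvHexChars_val (N : List Int) (hb : ∀ x ∈ N, 0 ≤ x ∧ x < 16)
    (hne : N ≠ []) (hhd : N.getD 0 0 ≠ 0) :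
    pvHexChars (pvVal16 N) = N.map (fun x => pvHexDigit x.toNat) := by
  induction N using List.reverseRecOn with
  | nil => exact absurd rfl hne
  | append_singleton M x ih =>
    rw [pvVal16_append_singleton]
    by_cases hM : M = []
    · subst hM
      have hx := hb x (by simp)
      rw [pvHexChars]
      simp [pvVal16, show x.toNat < 16 by omega]
    · have hhdM : M.getD 0 0 ≠ 0 := by
        match M, hM with
        | y :: ys, _ => simpa using hhd
      have hbM : ∀ z ∈ M, 0 ≤ z ∧ z < 16 := fun z hz => hb z (by simp [hz])
      have h1 : 1 ≤ pvVal16 M := pvVal16_pos M hM hhdM hbM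
      have hx := hb x (by simp)
      rw [pvHexChars]
      rw [dif_neg (by omega)]
      have hdiv : (16 * pvVal16 M + x.toNat) / 16 = pvVal16 M := by omega
      have hmod : (16 * pvVal16 M + x.toNat) % 16 = x.toNat := by omega
      rw [hdiv, hmod, ih hbM hM hhdM]
      simp

-- zero-padding format(n,'0wX') of the value of a w-long nibble list is exactly its digits
lemma pvFormat_map (N : List Int) (hb : ∀ x ∈ N, 0 ≤ x ∧ x < 16) (hne : N ≠ []) :
    List.replicate (N.length - (pvHexChars (pvVal16 N)).length) '0' ++ pvHexChars (pvVal16 N)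
      = N.map (fun x => pvHexDigit x.toNat) := by
  induction N with
  | nil => exact absurd rfl hne
  | cons x xs ih =>
    by_cases hx0 : x = 0
    · subst hx0
      have hval : pvVal16 ((0 : Int) :: xs) = pvVal16 xs := by simp [pvVal16]
      rcases List.eq_nil_or_concat' xs with rfl | _
      · rw [hval]
        rw [show pvHexChars (pvVal16 []) = ['0'] by rw [pvHexChars]; rfl]
        rfl
      · have hxsne : xs ≠ [] := by rintro rfl; simp_all
        have ihh := ih (fun z hz => hb z (by simp [hz])) hxsne
        have hlen : (pvHexChars (pvVal16 xs)).length ≤ xs.length := by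
          have := congrArg List.length ihh
          simp only [List.length_append, List.length_replicate, List.length_map] at this
          omega
        rw [hval, List.map_cons]
        simp only [List.length_cons]
        rw [show ((0:Int).toNat) = 0 by rfl]
        calc List.replicate ((xs.length + 1) - (pvHexChars (pvVal16 xs)).length) '0'
              ++ pvHexChars (pvVal16 xs)
            = '0' :: (List.replicate (xs.length - (pvHexChars (pvVal16 xs)).length) '0'
              ++ pvHexChars (pvVal16 xs)) := by
              rw [show (xs.length + 1) - (pvHexChars (pvVal16 xs)).length
                  = (xs.length - (pvHexChars (pvVal16 xs)).length) + 1 by omega,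
                List.replicate_succ]
              rfl
          _ = pvHexDigit 0 :: xs.map (fun x => pvHexDigit x.toNat) := by rw [ihh]; rfl
    · have hhd : (x :: xs).getD 0 0 ≠ 0 := by simpa using hx0
      have hmap := pvHexChars_val (x :: xs) hb (by simp) hhd
      rw [hmap]
      have : ((x :: xs).map (fun x => pvHexDigit x.toNat)).length = (x :: xs).length := by simp
      rw [this, Nat.sub_self]
      rfl

-- ===== VERDICT (by name: the statement is the Claim_ definition above) =====
theorem List2Vlans_spec : Claim_equal_List2Vlans := by
  intro vs d _hDom hPre
  obtain ⟨hd, hb⟩ := hPre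
  unfold Spec_List2Vlans List2Vlans List2Vlans_alt
  simp only []
  set L0 : List Char := List.replicate (d * 4).toNat '0' with hL0def
  set N0 : List Int := List.replicate d.toNat 0 with hN0def
  have hlenL0 : L0.length = (d * 4).toNat := by simp [hL0def]
  have hlenN0 : N0.length = d.toNat := by simp [hN0def]
  have hL0 : L0.length = 4 * N0.length := by rw [hlenL0, hlenN0]; omega
  have hb' : ∀ v ∈ vs, -((N0.length : Int) * 4) ≤ v ∧ v < (N0.length : Int) * 4 := by
    intro v hv
    obtain ⟨h1, h2⟩ := hb v hv
    rw [hlenN0]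
    omega
  have hinv0 : ∀ i, i < N0.length → N0.getD i 0 = (pvNib L0 i : Int) := by
    intro i hi
    rw [hN0def, hL0def]
    simp [List.getD, hlenN0 ▸ hi, pvNib, pvBit_replicate]
  obtain ⟨c1, c2, c3⟩ := pvLoop_inv vs L0 N0 hL0 hb' hinv0
  set L' := vs.foldl (fun L vlan => PySem.List.pySetD L vlan '1') L0 with hL'def
  set N' := vs.foldl pvStepB N0 with hN'def
  have hparse : L'.foldl (fun a c => 2 * a + (if c = '1' then 1 else 0)) 0 = pvVal16 N' := by
    rw [pvFoldlParse]
    simp only [Nat.zero_mul, Nat.zero_add]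
    exact pvParse_val N' L' (by omega) (fun i hi => c3 i (by omega))
  have hbN' : ∀ x ∈ N', 0 ≤ x ∧ x < 16 := by
    intro x hx
    obtain ⟨i, hi, rfl⟩ := List.mem_iff_getElem.mp hx
    have hgd : N'[i] = N'.getD i 0 := by simp [List.getD, List.getElem?_eq_getElem hi]
    have := c3 i (by omega)
    rw [hgd, this]
    have n0 : pvBit L' (4*i) ≤ 1 := pvBit_le_one _ _
    have n1 : pvBit L' (4*i+1) ≤ 1 := pvBit_le_one _ _
    have n2 : pvBit L' (4*i+2) ≤ 1 := pvBit_le_one _ _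
    have n3 : pvBit L' (4*i+3) ≤ 1 := pvBit_le_one _ _
    unfold pvNib
    constructor <;> [positivity; (push_cast; omega)]
  have hneN' : N' ≠ [] := by
    intro h
    rw [h] at c2
    simp at c2
    omega
  have hlenN' : N'.length = d.toNat := by rw [c2, hlenN0]
  rw [hparse]
  unfold pvFormatHexUpper
  rw [show d.toNat = N'.length from hlenN'.symm]
  rw [pvFormat_map N' hbN' hneN']
  congr 1
  apply List.map_congr_left
  intro x hx
  obtain ⟨hx0, hx16⟩ := hbN' x hx
  rw [PySem.List.pyGetD_eq_getElem pvHexTable ' ' hx0 (by simpa [pvHexTable] using hx16)]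
  simp only [pvHexDigit]
  rw [List.getD_eq_getElem _ _ (by simpa [pvHexTable] using hx16)]
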